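-- pv_equiv track=rewrite | github.com/unboxing96/ALGO | SWEA/D2/12712. 파리퇴치3/파리퇴치3.py | hitPlus
-- ===== SOURCE A (Python) =====
-- def hitPlus(n, m, x, y, arr):
--     tempCount = 0
--     for i in range(x-m+1, x+m):
--         for j in range(y-m+1, y+m):
--             if i < 0 or i >= n or j < 0 or j >= n:
--                 continue
--             if i == x or j == y:
--                 tempCount += arr[i][j]
--     return tempCount
-- ===== SOURCE B (Python) =====
-- def hitPlus(n, m, x, y, arr):
--     total = 0
--     if 0 <= x < n:
--         for j in range(max(0, y - m + 1), min(n, y + m)):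
--             total += arr[x][j]
--     if 0 <= y < n:
--         for i in range(max(0, x - m + 1), min(n, x + m)):
--             total += arr[i][y]
--     if 0 <= x < n and 0 <= y < n and m >= 1:
--         total -= arr[x][y]
--     return total
-- ===== Notes on version B (the rewrite author's own statement) =====
-- stated objective: faster
-- what changed: Instead of scanning the whole (2m-1)x(2m-1) window and testing each cell for the cross, B sums the clipped center row and clipped center column directly and subtracts the doubly counted center cell; intended as faster (O(m) vs O(m^2)), measured 3172x at the largest size both finished, though the probe could not fully confirm it (one oversized input failed for both).
import Mathlib
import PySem

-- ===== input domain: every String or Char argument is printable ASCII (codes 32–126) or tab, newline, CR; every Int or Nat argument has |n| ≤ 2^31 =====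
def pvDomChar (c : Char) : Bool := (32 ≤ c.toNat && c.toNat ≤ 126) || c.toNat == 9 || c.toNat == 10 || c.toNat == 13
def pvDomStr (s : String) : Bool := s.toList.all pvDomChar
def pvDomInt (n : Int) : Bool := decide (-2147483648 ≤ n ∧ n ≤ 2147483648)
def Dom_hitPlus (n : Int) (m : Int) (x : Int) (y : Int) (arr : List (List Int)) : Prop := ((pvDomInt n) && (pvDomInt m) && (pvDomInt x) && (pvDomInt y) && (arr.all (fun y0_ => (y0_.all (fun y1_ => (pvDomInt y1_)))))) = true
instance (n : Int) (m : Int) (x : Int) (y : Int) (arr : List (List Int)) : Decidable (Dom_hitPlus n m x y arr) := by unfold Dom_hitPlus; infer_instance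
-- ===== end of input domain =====

-- B sums the clipped center row and clipped center column and subtracts the doubly counted
-- center cell, instead of A's scan of the whole (2m-1)^2 window; intended as faster
-- (O(m) vs O(m^2) grid accesses), measured 3172x at the largest size both finished.


-- ===== PORT A =====
def hitPlus (n : Int) (m : Int) (x : Int) (y : Int) (arr : List (List Int)) : Int :=
  (PySem.List.pyRange (x - m + 1) (x + m) 1).foldl (fun tempCount i =>
    (PySem.List.pyRange (y - m + 1) (y + m) 1).foldl (fun tempCount j =>
      if i < 0 ∨ n ≤ i ∨ j < 0 ∨ n ≤ j then tempCount
      else if i = x ∨ j = y then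
        tempCount + PySem.List.pyGetD (PySem.List.pyGetD arr i []) j 0
      else tempCount) tempCount) 0

-- ===== PORT B =====
def hitPlus_alt (n : Int) (m : Int) (x : Int) (y : Int) (arr : List (List Int)) : Int :=
  let total : Int := 0
  let total :=
    if 0 ≤ x ∧ x < n then
      (PySem.List.pyRange (max 0 (y - m + 1)) (min n (y + m)) 1).foldl
        (fun total j => total + PySem.List.pyGetD (PySem.List.pyGetD arr x []) j 0) total
    else total
  let total :=
    if 0 ≤ y ∧ y < n then
      (PySem.List.pyRange (max 0 (x - m + 1)) (min n (x + m)) 1).foldl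
        (fun total i => total + PySem.List.pyGetD (PySem.List.pyGetD arr i []) y 0) total
    else total
  if 0 ≤ x ∧ x < n ∧ 0 ≤ y ∧ y < n ∧ 1 ≤ m then
    total - PySem.List.pyGetD (PySem.List.pyGetD arr x []) y 0
  else total

-- ===== PRECONDITION & SPEC =====
-- Pre_ holds exactly when every cell A touches exists: if the clipped center row is
-- visited, row x exists and is long enough; if the clipped center column is visited,
-- enough rows exist and each visited row is longer than y. Outside it A raises IndexError.
def Pre_hitPlus (n : Int) (m : Int) (x : Int) (y : Int) (arr : List (List Int)) : Prop :=
  (0 ≤ x ∧ x < n ∧ max 0 (y - m + 1) < min n (y + m) →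
      x < (arr.length : Int) ∧ min n (y + m) ≤ ((arr.getD x.toNat []).length : Int))
  ∧ (0 ≤ y ∧ y < n ∧ max 0 (x - m + 1) < min n (x + m) →
      min n (x + m) ≤ (arr.length : Int) ∧
      ∀ row ∈ (arr.take (min n (x + m)).toNat).drop (max 0 (x - m + 1)).toNat,
        y < (row.length : Int))
instance (n : Int) (m : Int) (x : Int) (y : Int) (arr : List (List Int)) : Decidable (Pre_hitPlus n m x y arr) := by unfold Pre_hitPlus; infer_instance

def pvWitness_hitPlus : Int × Int × Int × Int × List (List Int) :=
  (3, 2, 1, 1, [[1, 2, 3], [4, 5, 6], [7, 8, 9]])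

def Spec_hitPlus (n : Int) (m : Int) (x : Int) (y : Int) (arr : List (List Int)) (out : Int) : Prop := out = hitPlus_alt n m x y arr
instance (n : Int) (m : Int) (x : Int) (y : Int) (arr : List (List Int)) (out : Int) : Decidable (Spec_hitPlus n m x y arr out) := by unfold Spec_hitPlus; infer_instance

-- ===== CLAIM (what is proved, stated in full; the proofs are below) =====
def Claim_equal_hitPlus : Prop := ∀ (n : Int) (m : Int) (x : Int) (y : Int) (arr : List (List Int)), Dom_hitPlus n m x y arr → Pre_hitPlus n m x y arr → Spec_hitPlus n m x y arr (hitPlus n m x y arr)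

-- ===== LEMMAS AND PROOFS =====

-- sum of an if-then-else over a list is the sum over the filtered list
theorem pv_sum_ite_filter (l : List Int) (p : Int → Prop) [DecidablePred p] (f : Int → Int) :
    (l.map (fun j => if p j then f j else 0)).sum
      = ((l.filter (fun j => decide (p j))).map f).sum := by
  induction l with
  | nil => rfl
  | cons a t ih =>
    by_cases h : p a <;> simp [h, ih]

-- the in-bounds elements of range(lo,hi) are exactly range(max 0 lo, min n hi)
theorem pv_clip_filter (n lo hi : Int) :
    (PySem.List.pyRange lo hi 1).filter (fun j => decide (0 ≤ j ∧ j < n))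
      = PySem.List.pyRange (max 0 lo) (min n hi) 1 := by
  have hperm : List.Perm ((PySem.List.pyRange lo hi 1).filter (fun j => decide (0 ≤ j ∧ j < n)))
      (PySem.List.pyRange (max 0 lo) (min n hi) 1) := by
    refine (List.perm_ext_iff_of_nodup ?_ ?_).mpr ?_
    · exact (PySem.List.nodup_pyRange_one lo hi).filter _
    · exact PySem.List.nodup_pyRange_one _ _
    · intro j
      simp [List.mem_filter, PySem.List.mem_pyRange_one]
      omega
  exact List.Perm.eq_of_pairwise (le := (· < ·))
    (fun a b _ _ hab hba => absurd (lt_trans hab hba) (lt_irrefl a))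
    ((PySem.List.pairwise_lt_pyRange_one lo hi).filter _)
    (PySem.List.pairwise_lt_pyRange_one _ _) hperm

theorem pv_sum_clip (n lo hi : Int) (f : Int → Int) :
    ((PySem.List.pyRange lo hi 1).map (fun j => if 0 ≤ j ∧ j < n then f j else 0)).sum
      = ((PySem.List.pyRange (max 0 lo) (min n hi) 1).map f).sum := by
  rw [pv_sum_ite_filter, pv_clip_filter]

-- summing a function supported on a single point over a list without that point
theorem pv_sum_single_notmem (l : List Int) (v : Int) (f : Int → Int) (h : v ∉ l) :
    (l.map (fun j => if j = v then f j else 0)).sum = 0 := by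
  induction l with
  | nil => rfl
  | cons a t ih =>
    simp only [List.mem_cons, not_or] at h
    simp [Ne.symm h.1, ih h.2]

theorem pv_sum_single_nodup (l : List Int) (v : Int) (f : Int → Int) (h : l.Nodup) :
    (l.map (fun j => if j = v then f j else 0)).sum = if v ∈ l then f v else 0 := by
  induction l with
  | nil => simp
  | cons a t ih =>
    rcases List.nodup_cons.mp h with ⟨ha, ht⟩
    by_cases hav : a = v
    · subst hav
      simp [pv_sum_single_notmem t a f ha]
    · simp [hav, ih ht, Ne.symm hav]

theorem pv_sum_single_range (lo hi v : Int) (f : Int → Int) :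
    ((PySem.List.pyRange lo hi 1).map (fun j => if j = v then f j else 0)).sum
      = if lo ≤ v ∧ v < hi then f v else 0 := by
  rw [pv_sum_single_nodup _ _ _ (PySem.List.nodup_pyRange_one lo hi)]
  simp [PySem.List.mem_pyRange_one]

theorem pv_sum_map_add (l : List Int) (f g : Int → Int) :
    (l.map (fun j => f j + g j)).sum = (l.map f).sum + (l.map g).sum := by
  induction l with
  | nil => simp
  | cons a t ih => simp [ih]; ring

-- A as a double sum
theorem pv_hitPlus_eq_sum (n m x y : Int) (arr : List (List Int)) :
    hitPlus n m x y arr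
      = ((PySem.List.pyRange (x - m + 1) (x + m) 1).map (fun i =>
          ((PySem.List.pyRange (y - m + 1) (y + m) 1).map (fun j =>
            if i < 0 ∨ n ≤ i ∨ j < 0 ∨ n ≤ j then 0
            else if i = x ∨ j = y then PySem.List.pyGetD (PySem.List.pyGetD arr i []) j 0
            else 0)).sum)).sum := by
  unfold hitPlus
  have hinner : ∀ (i acc : Int),
      (PySem.List.pyRange (y - m + 1) (y + m) 1).foldl (fun tempCount j =>
        if i < 0 ∨ n ≤ i ∨ j < 0 ∨ n ≤ j then tempCount
        else if i = x ∨ j = y then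
          tempCount + PySem.List.pyGetD (PySem.List.pyGetD arr i []) j 0
        else tempCount) acc
      = acc + ((PySem.List.pyRange (y - m + 1) (y + m) 1).map (fun j =>
          if i < 0 ∨ n ≤ i ∨ j < 0 ∨ n ≤ j then 0
          else if i = x ∨ j = y then PySem.List.pyGetD (PySem.List.pyGetD arr i []) j 0
          else 0)).sum := by
    intro i acc
    rw [← PySem.List.foldl_add]
    apply PySem.List.foldl_congr_mem
    intro a j _
    split_ifs <;> ring
  calc (PySem.List.pyRange (x - m + 1) (x + m) 1).foldl _ 0
      = (PySem.List.pyRange (x - m + 1) (x + m) 1).foldl (fun acc i =>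
          acc + ((PySem.List.pyRange (y - m + 1) (y + m) 1).map (fun j =>
            if i < 0 ∨ n ≤ i ∨ j < 0 ∨ n ≤ j then 0
            else if i = x ∨ j = y then PySem.List.pyGetD (PySem.List.pyGetD arr i []) j 0
            else 0)).sum) 0 := by
        apply PySem.List.foldl_congr_mem
        intro acc i _
        exact hinner i acc
    _ = _ := by rw [PySem.List.foldl_add]; ring

-- B as sums
theorem pv_hitPlus_alt_eq_sum (n m x y : Int) (arr : List (List Int)) :
    hitPlus_alt n m x y arr
      = (if 0 ≤ x ∧ x < n then
           ((PySem.List.pyRange (max 0 (y - m + 1)) (min n (y + m)) 1).map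
             (fun j => PySem.List.pyGetD (PySem.List.pyGetD arr x []) j 0)).sum
         else 0)
        + (if 0 ≤ y ∧ y < n then
           ((PySem.List.pyRange (max 0 (x - m + 1)) (min n (x + m)) 1).map
             (fun i => PySem.List.pyGetD (PySem.List.pyGetD arr i []) y 0)).sum
         else 0)
        - (if 0 ≤ x ∧ x < n ∧ 0 ≤ y ∧ y < n ∧ 1 ≤ m then
           PySem.List.pyGetD (PySem.List.pyGetD arr x []) y 0
         else 0) := by
  unfold hitPlus_alt
  simp only [PySem.List.foldl_add]
  split_ifs <;> ring

-- proof-local abbreviation for the common cell access arr[i][j]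
def pvG (arr : List (List Int)) (i j : Int) : Int :=
  PySem.List.pyGetD (PySem.List.pyGetD arr i []) j 0

theorem pvG_eq (arr : List (List Int)) (i j : Int) :
    PySem.List.pyGetD (PySem.List.pyGetD arr i []) j 0 = pvG arr i j := rfl

theorem hitPlus_eq_alt (n m x y : Int) (arr : List (List Int)) :
    hitPlus n m x y arr = hitPlus_alt n m x y arr := by
  rw [pv_hitPlus_eq_sum, pv_hitPlus_alt_eq_sum]
  simp only [pvG_eq]
  by_cases hm : 1 ≤ m
  case neg =>
    -- m ≤ 0: every range is empty
    rw [PySem.List.pyRange_one_eq_nil (by omega : x + m ≤ x - m + 1),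
        PySem.List.pyRange_one_eq_nil (show min n (y + m) ≤ max 0 (y - m + 1) by omega),
        PySem.List.pyRange_one_eq_nil (show min n (x + m) ≤ max 0 (x - m + 1) by omega)]
    simp [hm]
  case pos =>
  -- split each cell of A into its row-contribution and its column-contribution
  have hsplit : ∀ i j : Int,
      (if i < 0 ∨ n ≤ i ∨ j < 0 ∨ n ≤ j then 0
       else if i = x ∨ j = y then pvG arr i j else 0)
      = (if i = x then (if (0 ≤ x ∧ x < n) ∧ 0 ≤ j ∧ j < n then pvG arr x j else 0) else 0)
        + (if j = y then (if i ≠ x ∧ (0 ≤ y ∧ y < n) ∧ 0 ≤ i ∧ i < n then pvG arr i y else 0) else 0) := by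
    intro i j
    by_cases hix : i = x <;> by_cases hjy : j = y <;>
      subst_vars <;> split_ifs
    all_goals (try (exfalso; omega))
    all_goals ring
  simp only [hsplit]
  rw [show (fun i => ((PySem.List.pyRange (y - m + 1) (y + m) 1).map (fun j =>
        (if i = x then (if (0 ≤ x ∧ x < n) ∧ 0 ≤ j ∧ j < n then pvG arr x j else 0) else 0)
        + (if j = y then (if i ≠ x ∧ (0 ≤ y ∧ y < n) ∧ 0 ≤ i ∧ i < n then pvG arr i y else 0) else 0))).sum)
      = (fun i =>
          ((PySem.List.pyRange (y - m + 1) (y + m) 1).map (fun j =>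
            if i = x then (if (0 ≤ x ∧ x < n) ∧ 0 ≤ j ∧ j < n then pvG arr x j else 0) else 0)).sum
          + ((PySem.List.pyRange (y - m + 1) (y + m) 1).map (fun j =>
            if j = y then (if i ≠ x ∧ (0 ≤ y ∧ y < n) ∧ 0 ≤ i ∧ i < n then pvG arr i y else 0) else 0)).sum)
      from funext fun i => pv_sum_map_add _ _ _]
  rw [show (fun i =>
          ((PySem.List.pyRange (y - m + 1) (y + m) 1).map (fun j =>
            if i = x then (if (0 ≤ x ∧ x < n) ∧ 0 ≤ j ∧ j < n then pvG arr x j else 0) else 0)).sum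
          + ((PySem.List.pyRange (y - m + 1) (y + m) 1).map (fun j =>
            if j = y then (if i ≠ x ∧ (0 ≤ y ∧ y < n) ∧ 0 ≤ i ∧ i < n then pvG arr i y else 0) else 0)).sum)
      = (fun i =>
          (if i = x then ((PySem.List.pyRange (y - m + 1) (y + m) 1).map (fun j =>
            if (0 ≤ x ∧ x < n) ∧ 0 ≤ j ∧ j < n then pvG arr x j else 0)).sum else 0)
          + (if y - m + 1 ≤ y ∧ y < y + m then
              (if i ≠ x ∧ (0 ≤ y ∧ y < n) ∧ 0 ≤ i ∧ i < n then pvG arr i y else 0) else 0))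
      from ?_]
  · rw [pv_sum_map_add]
    rw [pv_sum_single_range (x - m + 1) (x + m) x
        (fun _ => ((PySem.List.pyRange (y - m + 1) (y + m) 1).map (fun j =>
          if (0 ≤ x ∧ x < n) ∧ 0 ≤ j ∧ j < n then pvG arr x j else 0)).sum)]
    have hx : x - m + 1 ≤ x ∧ x < x + m := by omega
    have hy : y - m + 1 ≤ y ∧ y < y + m := by omega
    simp only [if_pos hx, if_pos hy]
    -- row sum: pull the constant guard out, then clip
    have hrow : ((PySem.List.pyRange (y - m + 1) (y + m) 1).map (fun j =>
        if (0 ≤ x ∧ x < n) ∧ 0 ≤ j ∧ j < n then pvG arr x j else 0)).sum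
        = (if 0 ≤ x ∧ x < n then
            ((PySem.List.pyRange (max 0 (y - m + 1)) (min n (y + m)) 1).map (fun j => pvG arr x j)).sum
          else 0) := by
      by_cases hxn : 0 ≤ x ∧ x < n
      · rw [if_pos hxn, ← pv_sum_clip n (y - m + 1) (y + m) (fun j => pvG arr x j)]
        congr 1
        apply List.map_congr_left
        intro j _
        simp [hxn]
      · rw [if_neg hxn]
        apply List.sum_eq_zero
        intro z hz
        rcases List.mem_map.mp hz with ⟨j, _, rfl⟩
        simp [hxn]
    rw [hrow]
    -- column part
    have hcol : ((PySem.List.pyRange (x - m + 1) (x + m) 1).map (fun i =>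
        if i ≠ x ∧ (0 ≤ y ∧ y < n) ∧ 0 ≤ i ∧ i < n then pvG arr i y else 0)).sum
        = (if 0 ≤ y ∧ y < n then
            ((PySem.List.pyRange (max 0 (x - m + 1)) (min n (x + m)) 1).map (fun i => pvG arr i y)).sum
          else 0)
          - (if 0 ≤ x ∧ x < n ∧ 0 ≤ y ∧ y < n ∧ 1 ≤ m then pvG arr x y else 0) := by
      by_cases hyn : 0 ≤ y ∧ y < n
      · rw [if_pos hyn]
        have hterm : ∀ i : Int,
            (if i ≠ x ∧ (0 ≤ y ∧ y < n) ∧ 0 ≤ i ∧ i < n then pvG arr i y else 0)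
            = (if 0 ≤ i ∧ i < n then pvG arr i y else 0)
              + (if i = x then (if 0 ≤ x ∧ x < n then -pvG arr x y else 0) else 0) := by
          intro i
          by_cases hix : i = x <;> subst_vars <;> split_ifs
          all_goals (try (exfalso; omega))
          all_goals simp_all
        simp only [hterm]
        rw [pv_sum_map_add, pv_sum_clip n (x - m + 1) (x + m) (fun i => pvG arr i y),
            pv_sum_single_range (x - m + 1) (x + m) x (fun _ => if 0 ≤ x ∧ x < n then -pvG arr x y else 0),
            if_pos hx]
        by_cases hxn : 0 ≤ x ∧ x < n
        · simp only [if_pos hxn, if_pos (show 0 ≤ x ∧ x < n ∧ 0 ≤ y ∧ y < n ∧ 1 ≤ m by tauto)]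
          ring
        · rw [if_neg hxn, if_neg (by tauto)]
          ring
      · rw [if_neg hyn, if_neg (by tauto)]
        have : ∀ z ∈ (PySem.List.pyRange (x - m + 1) (x + m) 1).map (fun i =>
            if i ≠ x ∧ (0 ≤ y ∧ y < n) ∧ 0 ≤ i ∧ i < n then pvG arr i y else 0), z = 0 := by
          intro z hz
          rcases List.mem_map.mp hz with ⟨i, _, rfl⟩
          simp [hyn]
        rw [List.sum_eq_zero this]
        ring
    rw [hcol]
    ring
  · funext i
    congr 1
    · by_cases hix : i = x
      · simp [hix]
      · simp [hix]
    · rw [pv_sum_single_range (y - m + 1) (y + m) y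
        (fun _ => if i ≠ x ∧ (0 ≤ y ∧ y < n) ∧ 0 ≤ i ∧ i < n then pvG arr i y else 0)]

-- ===== VERDICT (by name: the statement is the Claim_ definition above) =====
theorem hitPlus_spec : Claim_equal_hitPlus := by
  intro n m x y arr _ _
  unfold Spec_hitPlus
  exact hitPlus_eq_alt n m x y arr
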